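-- pv_equiv track=rewrite | github.com/kollivenkataprasad8-ui/Smart-Public-Complaint-Box-Digital-Al-Powered-Complaint-Management-System | complaint_classifier.py | predict_priority
-- ===== SOURCE A (Python) =====
-- def predict_priority(complaint_text: str, category: str) -> str:
--     """Determine priority based on keywords and category"""
--     text_lower = complaint_text.lower()
--
--     # High priority keywords
--     high_priority_keywords = [
--         'urgent', 'emergency', 'dangerous', 'accident', 'health',
--         'death', 'fire', 'flood', 'burst', 'leaking', 'exposed',
--         'fallen', 'broken', 'damaged', 'contaminated', 'overflow'
--     ]
--
--     # Medium priority keywords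
--     medium_priority_keywords = [
--         'irregular', 'frequent', 'poor', 'need', 'required',
--         'not working', 'problem', 'issue'
--     ]
--
--     # Check for high priority
--     for keyword in high_priority_keywords:
--         if keyword in text_lower:
--             return 'High'
--
--     # Check for medium priority
--     for keyword in medium_priority_keywords:
--         if keyword in text_lower:
--             return 'Medium'
--
--     # Default to low priority
--     return 'Low'
-- ===== SOURCE B (Python) =====
-- def predict_priority(complaint_text: str, category: str) -> str:
--     """Determine priority: naive multi-pattern text scan with a first-character
--     keyword index, instead of one substring search per keyword."""
--     text = complaint_text.lower()
--     high = [
--         'urgent', 'emergency', 'dangerous', 'accident', 'health',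
--         'death', 'fire', 'flood', 'burst', 'leaking', 'exposed',
--         'fallen', 'broken', 'damaged', 'contaminated', 'overflow'
--     ]
--     medium = [
--         'irregular', 'frequent', 'poor', 'need', 'required',
--         'not working', 'problem', 'issue'
--     ]
--     table = [(kw, 2) for kw in high] + [(kw, 1) for kw in medium]
--     index = {}
--     for kw, rank in table:
--         index.setdefault(kw[0], []).append((kw, rank))
--     best = 0
--     for i, ch in enumerate(text):
--         for kw, rank in index.get(ch, []):
--             if best < rank and text.startswith(kw, i):
--                 best = rank
--     return 'High' if best == 2 else ('Medium' if best == 1 else 'Low')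
-- ===== Notes on version B (the rewrite author's own statement) =====
-- stated objective: alternative
-- what changed: Replaces A's two precedence-ordered per-keyword substring scans with a naive multi-pattern matcher: build a dict indexing (keyword, rank) pairs by their first character, then walk the text positions once, matching only the keywords bucketed under the current character and keeping the best rank.
import Mathlib
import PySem

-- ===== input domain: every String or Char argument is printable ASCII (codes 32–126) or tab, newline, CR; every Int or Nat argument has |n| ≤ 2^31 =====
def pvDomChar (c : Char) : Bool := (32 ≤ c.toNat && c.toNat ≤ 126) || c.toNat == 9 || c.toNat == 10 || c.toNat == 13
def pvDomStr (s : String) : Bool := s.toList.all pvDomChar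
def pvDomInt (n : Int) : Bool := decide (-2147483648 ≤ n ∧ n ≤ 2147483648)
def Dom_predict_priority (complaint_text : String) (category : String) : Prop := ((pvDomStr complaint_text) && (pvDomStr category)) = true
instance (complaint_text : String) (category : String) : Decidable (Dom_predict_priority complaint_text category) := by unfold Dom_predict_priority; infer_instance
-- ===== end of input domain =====

-- B replaces A's two precedence-ordered per-keyword substring scans by a naive
-- multi-pattern matcher: one pass over the text positions with a dict indexing
-- the (keyword, rank) pairs by first character (alternative decomposition).

-- ===== PORT A =====
def pvHighKeywords : List String :=
  ["urgent", "emergency", "dangerous", "accident", "health",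
   "death", "fire", "flood", "burst", "leaking", "exposed",
   "fallen", "broken", "damaged", "contaminated", "overflow"]

def pvMediumKeywords : List String :=
  ["irregular", "frequent", "poor", "need", "required",
   "not working", "problem", "issue"]

-- "for keyword in kws: if keyword in text_lower: return res" — first-match early return
def pvScan (t : String) (kws : List String) (res : String) : Option String :=
  match kws with
  | [] => none
  | k :: ks => if PySem.Str.isIn k t then some res else pvScan t ks res

def predict_priority (complaint_text : String) (category : String) : String :=
  let text_lower := PySem.Str.lower complaint_text
  match pvScan text_lower pvHighKeywords "High" with
  | some r => r
  | none =>
    match pvScan text_lower pvMediumKeywords "Medium" with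
    | some r => r
    | none => "Low"

-- ===== PORT B =====
def pvTable : List (String × Nat) :=
  pvHighKeywords.map (fun kw => (kw, 2)) ++ pvMediumKeywords.map (fun kw => (kw, 1))

-- kw[0]: every keyword is nonempty; the one-character string is modeled as a Char key
def pvHead (kw : String) : Char := kw.toList.head!

-- index.setdefault(kw[0], []).append((kw, rank)) appends to the stored list:
-- exactly d.modify (kw[0]) [] (· ++ [(kw, rank)])
def pvIndex : PySem.Dict Char (List (String × Nat)) :=
  (pvTable.map (fun p => (pvHead p.1, p))).foldl
    (fun d q => d.modify q.1 [] (fun l => l ++ [q.2])) PySem.Dict.empty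

def predict_priority_alt (complaint_text : String) (category : String) : String :=
  let text := PySem.Chars.lower complaint_text.toList
  let best : Nat := (PySem.List.enumerate text).foldl
    (fun best q =>
      (pvIndex.getD q.2 []).foldl
        (fun b p =>
          -- text.startswith(kw, i) with 0 ≤ i = q.1 < len(text): kw is a prefix of text[i:]
          if b < p.2 ∧ PySem.Chars.startswith (text.drop q.1.toNat) p.1.toList = true then p.2 else b)
        best) 0
  if best = 2 then "High" else if best = 1 then "Medium" else "Low"

-- ===== PRECONDITION & SPEC =====
def Spec_predict_priority (complaint_text : String) (category : String) (out : String) : Prop := out = predict_priority_alt complaint_text category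
instance (complaint_text : String) (category : String) (out : String) : Decidable (Spec_predict_priority complaint_text category out) := by unfold Spec_predict_priority; infer_instance

-- ===== CLAIM (what is proved, stated in full; the proofs are below) =====
def Claim_equal_predict_priority : Prop := ∀ (complaint_text : String) (category : String), Dom_predict_priority complaint_text category → Spec_predict_priority complaint_text category (predict_priority complaint_text category)

-- ===== LEMMAS AND PROOFS =====

-- A's early-return scan finds a match iff some keyword is a substring
theorem pvScan_eq_any (t : String) (kws : List String) (res : String) :
    pvScan t kws res = if kws.any (fun k => PySem.Str.isIn k t) then some res else none := by
  induction kws with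
  | nil => rfl
  | cons k ks ih =>
    rw [pvScan, List.any_cons, ih]
    by_cases hk : PySem.Str.isIn k t = true
    · simp only [hk, Bool.true_or, if_true]
    · rw [Bool.not_eq_true] at hk
      simp only [hk, Bool.false_or, Bool.false_eq_true, if_false]

-- B's guarded update is a conditional max
theorem pv_step_eq (T : List Char) (i : Nat) (b : Nat) (p : String × Nat) :
    (if b < p.2 ∧ PySem.Chars.startswith (T.drop i) p.1.toList = true then p.2 else b)
    = if PySem.Chars.startswith (T.drop i) p.1.toList then max b p.2 else b := by
  by_cases h : PySem.Chars.startswith (T.drop i) p.1.toList = true <;>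
    by_cases hb : b < p.2 <;> simp [h, hb] <;> omega

def pvMatchAt (T : List Char) (i : Nat) (kws : List String) : Bool :=
  kws.any (fun kw => PySem.Chars.startswith (T.drop i) kw.toList)

def pvRank (T : List Char) (i : Nat) : Nat :=
  max (if pvMatchAt T i pvHighKeywords then 2 else 0)
      (if pvMatchAt T i pvMediumKeywords then 1 else 0)

theorem pv_fold_map (T : List Char) (i : Nat) (kws : List String) (r b : Nat) :
    (kws.map (fun kw => (kw, r))).foldl
      (fun b p => if PySem.Chars.startswith (T.drop i) p.1.toList then max b p.2 else b) b
    = if pvMatchAt T i kws then max b r else b := by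
  induction kws generalizing b with
  | nil => rfl
  | cons k ks ih =>
    simp only [List.map_cons, List.foldl_cons, pvMatchAt, List.any_cons]
    by_cases hk : PySem.Chars.startswith (T.drop i) k.toList = true
    · rw [if_pos hk, ih]
      simp only [pvMatchAt, hk, Bool.true_or, if_true]
      by_cases ha : (ks.any fun kw => PySem.Chars.startswith (T.drop i) kw.toList) = true
      · simp only [ha, if_true, max_assoc, max_self]
      · simp only [ha, Bool.false_eq_true, if_false]
    · rw [if_neg hk, ih]
      rw [Bool.not_eq_true] at hk
      simp [pvMatchAt, hk]

theorem pv_fold_table (T : List Char) (i : Nat) (b : Nat) :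
    pvTable.foldl
      (fun b p => if PySem.Chars.startswith (T.drop i) p.1.toList then max b p.2 else b) b
    = max b (pvRank T i) := by
  unfold pvTable pvRank
  rw [List.foldl_append, pv_fold_map, pv_fold_map]
  by_cases h : pvMatchAt T i pvHighKeywords = true <;>
    by_cases m : pvMatchAt T i pvMediumKeywords = true <;> simp [h, m]

-- the first-char buckets of the index are a filter of the table
theorem pv_bucket (c : Char) :
    pvIndex.getD c [] = pvTable.filter (fun p => pvHead p.1 == c) := by
  unfold pvIndex
  rw [PySem.Dict.getD_foldl_modify_append]
  simp [List.filter_map, List.map_map, Function.comp_def]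

theorem pv_table_heads : ∀ p ∈ pvTable, p.1.toList.head? = some (pvHead p.1) := by decide

theorem pv_inner_bucket (T : List Char) (k : Nat) (hk : k < T.length) (b : Nat) :
    (pvIndex.getD T[k] []).foldl
      (fun b p => if b < p.2 ∧ PySem.Chars.startswith (T.drop k) p.1.toList = true then p.2 else b) b
    = pvTable.foldl
      (fun b p => if b < p.2 ∧ PySem.Chars.startswith (T.drop k) p.1.toList = true then p.2 else b) b := by
  rw [pv_bucket, List.foldl_filter]
  apply PySem.List.foldl_congr_mem
  intro acc p hp
  by_cases hc : (pvHead p.1 == T[k]) = true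
  · rw [if_pos hc]
  · rw [Bool.not_eq_true] at hc
    rw [hc, if_neg (by simp)]
    have hh := pv_table_heads p hp
    have hfalse : PySem.Chars.startswith (T.drop k) p.1.toList = false := by
      rw [Bool.eq_false_iff, Ne, PySem.Chars.startswith_iff]
      intro hpref
      cases hkw : p.1.toList with
      | nil => rw [hkw] at hh; simp at hh
      | cons c0 rest =>
        rw [hkw] at hh hpref
        have hc0 : c0 = pvHead p.1 := by simpa using hh
        rw [← List.getElem_cons_drop hk] at hpref
        have := (List.cons_prefix_cons.mp hpref).1
        rw [hc0] at this
        rw [this] at hc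
        simp at hc
    rw [hfalse]
    simp
theorem pv_best_eq (T : List Char) :
    (PySem.List.enumerate T).foldl
      (fun best q =>
        (pvIndex.getD q.2 []).foldl
          (fun b p => if b < p.2 ∧ PySem.Chars.startswith (T.drop q.1.toNat) p.1.toList = true then p.2 else b)
          best) 0
    = ((PySem.List.enumerate T).map (fun q => pvRank T q.1.toNat)).foldl max 0 := by
  rw [List.foldl_map]
  apply PySem.List.foldl_congr_mem
  intro acc q hq
  obtain ⟨k, hk, rfl⟩ := (PySem.List.mem_enumerate_iff _ _ _).mp hq
  have h1 : ((0:Int) + (k:Int)).toNat = k := by omega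
  simp only [h1]
  rw [pv_inner_bucket T k hk]
  simp only [pv_step_eq]
  exact pv_fold_table T k acc

theorem pv_rank_le (T : List Char) (i : Nat) : pvRank T i ≤ 2 := by
  unfold pvRank; split_ifs <;> omega

theorem pv_isIn_iff (kw : String) (hkw : kw.toList ≠ []) (T : List Char) :
    PySem.Chars.isIn kw.toList T = true ↔
      ∃ i, i < T.length ∧ PySem.Chars.startswith (T.drop i) kw.toList = true := by
  rw [← PySem.Chars.exists_prefix_drop_iff_isIn]
  constructor
  · rintro ⟨j, hj⟩
    by_cases h : j < T.length
    · exact ⟨j, h, (PySem.Chars.startswith_iff _ _).mpr hj⟩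
    · exfalso
      rw [List.drop_eq_nil_of_le (by omega)] at hj
      exact hkw (List.prefix_nil.mp hj)
  · rintro ⟨i, _, hi⟩
    exact ⟨i, (PySem.Chars.startswith_iff _ _).mp hi⟩

theorem pv_kws_ne : ∀ kw ∈ pvHighKeywords ++ pvMediumKeywords, kw.toList ≠ [] := by decide

theorem pv_matchAt_isIn (T : List Char) (kws : List String)
    (hne : ∀ kw ∈ kws, kw.toList ≠ []) :
    (kws.any (fun kw => PySem.Chars.isIn kw.toList T)) = true ↔
      ∃ i, i < T.length ∧ pvMatchAt T i kws = true := by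
  unfold pvMatchAt
  simp only [List.any_eq_true]
  constructor
  · rintro ⟨kw, hkw, hin⟩
    obtain ⟨i, hi, hs⟩ := (pv_isIn_iff kw (hne kw hkw) T).mp hin
    exact ⟨i, hi, kw, hkw, hs⟩
  · rintro ⟨i, hi, kw, hkw, hs⟩
    exact ⟨kw, hkw, (pv_isIn_iff kw (hne kw hkw) T).mpr ⟨i, hi, hs⟩⟩

theorem pv_best_char (T : List Char) :
    ((PySem.List.enumerate T).map (fun q => pvRank T q.1.toNat)).foldl max 0
    = if pvHighKeywords.any (fun kw => PySem.Chars.isIn kw.toList T) then 2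
      else if pvMediumKeywords.any (fun kw => PySem.Chars.isIn kw.toList T) then 1 else 0 := by
  have hneH : ∀ kw ∈ pvHighKeywords, kw.toList ≠ [] := by
    intro kw h; exact pv_kws_ne kw (List.mem_append_left _ h)
  have hneM : ∀ kw ∈ pvMediumKeywords, kw.toList ≠ [] := by
    intro kw h; exact pv_kws_ne kw (List.mem_append_right _ h)
  have hmemrank : ∀ i, i < T.length →
      pvRank T i ∈ (PySem.List.enumerate T).map (fun q => pvRank T q.1.toNat) := by
    intro i hi
    refine List.mem_map.mpr ⟨((0:Int) + (i:Int), T[i]), ?_, ?_⟩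
    · exact (PySem.List.mem_enumerate_iff _ _ _).mpr ⟨i, hi, rfl⟩
    · simp
  have hrank_of_mem : ∀ y ∈ (PySem.List.enumerate T).map (fun q => pvRank T q.1.toNat),
      ∃ i, i < T.length ∧ y = pvRank T i := by
    intro y hy
    obtain ⟨q, hq, rfl⟩ := List.mem_map.mp hy
    obtain ⟨k, hk, rfl⟩ := (PySem.List.mem_enumerate_iff _ _ _).mp hq
    exact ⟨k, hk, by simp⟩
  have hle := PySem.List.le_foldl_max
    ((PySem.List.enumerate T).map (fun q => pvRank T q.1.toNat)) 0
  have hmem := PySem.List.foldl_max_mem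
    ((PySem.List.enumerate T).map (fun q => pvRank T q.1.toNat)) 0
  by_cases hH : (pvHighKeywords.any fun kw => PySem.Chars.isIn kw.toList T) = true
  · rw [if_pos hH]
    obtain ⟨i, hi, hm⟩ := (pv_matchAt_isIn T _ hneH).mp hH
    have h2 : pvRank T i = 2 := by unfold pvRank; simp only [hm, if_true]; split_ifs <;> decide
    have hlow : 2 ≤ _ := hle.2 _ (h2 ▸ hmemrank i hi)
    rcases hmem with h0 | hin
    · omega
    · obtain ⟨j, hj, hjv⟩ := hrank_of_mem _ hin
      have := pv_rank_le T j
      omega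
  · have hHall : ∀ i, i < T.length → pvMatchAt T i pvHighKeywords = false := by
      intro i hi
      by_contra h
      exact hH ((pv_matchAt_isIn T _ hneH).mpr ⟨i, hi, by simpa using h⟩)
    have hrle1 : ∀ i, i < T.length → pvRank T i ≤ 1 := by
      intro i hi
      unfold pvRank
      simp only [hHall i hi, Bool.false_eq_true, if_false]
      split_ifs <;> decide
    rw [Bool.not_eq_true] at hH
    rw [hH]
    simp only [Bool.false_eq_true, if_false]
    by_cases hM : (pvMediumKeywords.any fun kw => PySem.Chars.isIn kw.toList T) = true
    · rw [if_pos hM]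
      obtain ⟨i, hi, hm⟩ := (pv_matchAt_isIn T _ hneM).mp hM
      have h1v : pvRank T i = 1 := by
        unfold pvRank; simp only [hm, hHall i hi, if_true, Bool.false_eq_true, if_false]; decide
      have hlow : 1 ≤ _ := hle.2 _ (h1v ▸ hmemrank i hi)
      rcases hmem with h0 | hin
      · omega
      · obtain ⟨j, hj, hjv⟩ := hrank_of_mem _ hin
        have := hrle1 j hj
        omega
    · rw [Bool.not_eq_true] at hM
      rw [hM]
      simp only [Bool.false_eq_true, if_false]
      have hall0 : ∀ i, i < T.length → pvRank T i = 0 := by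
        intro i hi
        have hMall : pvMatchAt T i pvMediumKeywords = false := by
          by_contra h
          have := (pv_matchAt_isIn T _ hneM).mpr ⟨i, hi, by simpa using h⟩
          rw [hM] at this
          exact Bool.noConfusion this
        unfold pvRank
        rw [hHall i hi, hMall]
        simp
      rcases hmem with h0 | hin
      · exact h0
      · obtain ⟨j, hj, hjv⟩ := hrank_of_mem _ hin
        rw [hjv, hall0 j hj]

-- ===== VERDICT (by name: the statement is the Claim_ definition above) =====
theorem predict_priority_spec : Claim_equal_predict_priority := by
  intro complaint_text category _
  unfold Spec_predict_priority predict_priority predict_priority_alt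
  simp only [pvScan_eq_any, pv_best_eq, pv_best_char, PySem.Str.isIn_eq, PySem.Str.toList_lower]
  generalize (pvHighKeywords.any fun k => PySem.Chars.isIn k.toList (PySem.Chars.lower complaint_text.toList)) = h
  generalize (pvMediumKeywords.any fun k => PySem.Chars.isIn k.toList (PySem.Chars.lower complaint_text.toList)) = m
  cases h <;> cases m <;> rfl
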